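-- pv_equiv track=rewrite | github.com/PatrickPatalong/Algorithmen-und-Datenstrukturen | Ü11/Seam Carving.py | drop_pixels
-- ===== SOURCE A (Python) =====
-- def drop_pixels(image, path):
--     new_image = []
--     i = 0
--     # einfach prüfen ob das pixel im weg liegt oder nicht, je nachdem in das neue bild einfügen
--     for pixel in image:
--         if i not in path:
--             new_image.append(pixel)
--         i += 1
--     return new_image
-- ===== SOURCE B (Python) =====
-- def drop_pixels(image, path):
--     # Keep-the-runs version: concatenate the maximal slices between drop indices.
--     remove = sorted({i for i in path if 0 <= i < len(image)})
--     new_image = []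
--     start = 0
--     for idx in remove:
--         new_image.extend(image[start:idx])
--         start = idx + 1
--     new_image.extend(image[start:])
--     return new_image
-- ===== Notes on version B (the rewrite author's own statement) =====
-- stated objective: faster
-- what changed: Instead of testing every index against path with 'i not in path' (a linear scan per pixel), B normalises path once to the sorted set of in-range drop indices and builds the result by concatenating the surviving slices between consecutive drop points.
import Mathlib
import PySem

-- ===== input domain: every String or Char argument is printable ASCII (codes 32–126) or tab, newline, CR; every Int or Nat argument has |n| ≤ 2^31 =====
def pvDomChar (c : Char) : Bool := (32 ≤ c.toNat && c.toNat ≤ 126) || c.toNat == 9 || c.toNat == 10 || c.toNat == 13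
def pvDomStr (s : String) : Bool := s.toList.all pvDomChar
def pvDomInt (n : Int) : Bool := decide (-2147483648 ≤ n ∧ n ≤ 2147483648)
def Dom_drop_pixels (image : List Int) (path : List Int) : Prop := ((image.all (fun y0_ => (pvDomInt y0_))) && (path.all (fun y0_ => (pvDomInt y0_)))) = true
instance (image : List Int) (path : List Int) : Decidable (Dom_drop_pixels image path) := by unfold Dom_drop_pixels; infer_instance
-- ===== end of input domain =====

-- B replaces A's per-pixel 'i not in path' test by one normalisation of path
-- (sorted set of in-range indices) followed by concatenating the surviving slices.

-- ===== PORT A =====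
-- literal port of A: one pass over image with counter i, appending when i not in path
def drop_pixels (image : List Int) (path : List Int) : List Int :=
  (image.foldl (fun (st : Int × List Int) pixel =>
      (st.1 + 1, if path.contains st.1 = false then st.2 ++ [pixel] else st.2))
    (0, [])).2

-- ===== PORT B =====
-- literal port of B: remove = sorted({i for i in path if 0 <= i < len(image)}),
-- then concatenate the image[start:idx] runs and the final tail image[start:]
def drop_pixels_alt (image : List Int) (path : List Int) : List Int :=
  let remove := PySem.List.sorted
      (PySem.Set.ofList (path.filter (fun i => decide (0 ≤ i) && decide (i < (image.length : Int)))))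
      (fun x => x) false
  let st := remove.foldl (fun (st : Int × List Int) idx =>
      (idx + 1, st.2 ++ PySem.List.slice image (some st.1) (some idx))) (0, [])
  st.2 ++ PySem.List.slice image (some st.1) none

-- ===== PRECONDITION & SPEC =====
def Spec_drop_pixels (image : List Int) (path : List Int) (out : List Int) : Prop := out = drop_pixels_alt image path
instance (image : List Int) (path : List Int) (out : List Int) : Decidable (Spec_drop_pixels image path out) := by unfold Spec_drop_pixels; infer_instance

-- ===== CLAIM (what is proved, stated in full; the proofs are below) =====
def Claim_equal_drop_pixels : Prop := ∀ (image : List Int) (path : List Int), Dom_drop_pixels image path → Spec_drop_pixels image path (drop_pixels image path)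

-- ===== LEMMAS AND PROOFS =====

-- reference function: keep pixel x at index i iff i ∉ path
def keepFrom (path : List Int) (i : Int) : List Int → List Int
  | [] => []
  | x :: xs => if path.contains i then keepFrom path (i + 1) xs else x :: keepFrom path (i + 1) xs

theorem keepFrom_no_hit (path : List Int) (i : Int) (xs : List Int)
    (h : ∀ j : Int, i ≤ j → j < i + xs.length → path.contains j = false) :
    keepFrom path i xs = xs := by
  induction xs generalizing i with
  | nil => rfl
  | cons x xs ih =>
    have hx : path.contains i = false := h i le_rfl (by simp)
    simp only [keepFrom, hx, Bool.false_eq_true, if_false, List.cons.injEq, true_and]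
    exact ih (i + 1) (fun j h1 h2 => h j (by omega) (by simp at h2 ⊢; omega))

theorem keepFrom_append (path : List Int) (i : Int) (xs ys : List Int) :
    keepFrom path i (xs ++ ys) = keepFrom path i xs ++ keepFrom path (i + xs.length) ys := by
  induction xs generalizing i with
  | nil => simp [keepFrom]
  | cons x xs ih =>
    simp only [List.cons_append, keepFrom, ih (i + 1), List.length_cons]
    have : i + 1 + (xs.length : Int) = i + ((xs.length : Int) + 1) := by ring
    rw [this]
    push_cast
    split <;> simp

-- A's fold computes keepFrom
theorem dropA_inv (path : List Int) (xs : List Int) (i : Int) (acc : List Int) :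
    (xs.foldl (fun (st : Int × List Int) pixel =>
        (st.1 + 1, if path.contains st.1 = false then st.2 ++ [pixel] else st.2))
      (i, acc)).2 = acc ++ keepFrom path i xs := by
  induction xs generalizing i acc with
  | nil => simp [keepFrom]
  | cons x xs ih =>
    rcases h : path.contains i with _ | _ <;>
      simp only [List.foldl_cons, keepFrom, h, Bool.true_eq_false, Bool.false_eq_true,
        if_false, if_true] <;> rw [ih] <;> simp

theorem drop_pixels_eq_keepFrom (image path : List Int) :
    drop_pixels image path = keepFrom path 0 image := by
  simpa [drop_pixels] using dropA_inv path image 0 []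

-- B's fold, restated structurally
def runB (image : List Int) : List Int → Int → List Int
  | [], start => PySem.List.slice image (some start) none
  | idx :: rest, start => PySem.List.slice image (some start) (some idx) ++ runB image rest (idx + 1)

theorem dropB_inv (image : List Int) (r : List Int) (s : Int) (acc : List Int) :
    (r.foldl (fun (st : Int × List Int) idx =>
        (idx + 1, st.2 ++ PySem.List.slice image (some st.1) (some idx))) (s, acc)).2
      ++ PySem.List.slice image
        (some (r.foldl (fun (st : Int × List Int) idx =>
          (idx + 1, st.2 ++ PySem.List.slice image (some st.1) (some idx))) (s, acc)).1) none
      = acc ++ runB image r s := by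
  induction r generalizing s acc with
  | nil => simp [runB]
  | cons idx rest ih =>
    simp only [List.foldl_cons, runB]
    rw [ih]
    simp

-- runB over a strictly increasing list of exactly the in-range members of path equals keepFrom
theorem runB_eq_keepFrom (image path : List Int) (r : List Int) (start : Int)
    (hs : r.Pairwise (· < ·)) (h0 : 0 ≤ start)
    (hmem : ∀ j ∈ r, start ≤ j ∧ j < (image.length : Int))
    (hiff : ∀ j : Int, start ≤ j → j < (image.length : Int) → (path.contains j = true ↔ j ∈ r)) :
    runB image r start = keepFrom path start (image.drop start.toNat) := by
  induction r generalizing start with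
  | nil =>
    rw [runB, PySem.List.slice_from image h0]
    refine (keepFrom_no_hit _ _ _ ?_).symm
    intro j h1 h2
    by_contra hc
    have hc' : path.contains j = true := by
      cases h : path.contains j with
      | false => exact absurd h hc
      | true => rfl
    have hlen : (image.drop start.toNat).length = image.length - start.toNat := by simp
    have hj : j < (image.length : Int) := by
      rw [hlen] at h2
      omega
    exact absurd ((hiff j h1 hj).mp hc') (by simp)
  | cons idx rest ih =>
    obtain ⟨hsi, hil⟩ := hmem idx (by simp)
    have hidx0 : 0 ≤ idx := le_trans h0 hsi
    have hrest : ∀ j ∈ rest, idx < j := by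
      intro j hj; exact (List.pairwise_cons.mp hs).1 j hj
    -- nat versions of the bounds
    have hnm : start.toNat ≤ idx.toNat := by omega
    have hml : idx.toNat < image.length := by omega
    -- decompose the remaining image
    set A : List Int := (image.drop start.toNat).take (idx.toNat - start.toNat) with hA
    have hlenA : A.length = idx.toNat - start.toNat := by
      simp [hA]; omega
    have hdec : image.drop start.toNat = A ++ image[idx.toNat] :: image.drop (idx.toNat + 1) := by
      calc image.drop start.toNat
          = A ++ (image.drop start.toNat).drop (idx.toNat - start.toNat) := by
            rw [hA, List.take_append_drop]
        _ = A ++ image.drop (start.toNat + (idx.toNat - start.toNat)) := by rw [List.drop_drop]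
        _ = A ++ image.drop idx.toNat := by
            rw [show start.toNat + (idx.toNat - start.toNat) = idx.toNat from by omega]
        _ = A ++ image[idx.toNat] :: image.drop (idx.toNat + 1) := by
            rw [List.drop_eq_getElem_cons hml]
    -- the IH applied at idx + 1
    have hIH : runB image rest (idx + 1) = keepFrom path (idx + 1) (image.drop (idx + 1).toNat) := by
      refine ih (idx + 1) (List.pairwise_cons.mp hs).2 (by omega) ?_ ?_
      · intro j hj
        exact ⟨by have := hrest j hj; omega, (hmem j (List.mem_cons_of_mem _ hj)).2⟩
      · intro j h1 h2
        constructor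
        · intro hcj
          have := (hiff j (by omega) h2).mp hcj
          rcases List.mem_cons.mp this with h | h
          · omega
          · exact h
        · intro hj
          exact (hiff j (by omega) h2).mpr (List.mem_cons_of_mem _ hj)
    -- no index in [start, idx) is in path
    have hAkeep : keepFrom path start A = A := by
      apply keepFrom_no_hit
      intro j h1 h2
      rw [hlenA] at h2
      by_contra hc
      have hc' : path.contains j = true := by
        cases h : path.contains j with
        | false => exact absurd h hc
        | true => rfl
      have hj : j < idx := by omega
      rcases List.mem_cons.mp ((hiff j h1 (by omega)).mp hc') with h | h
      · omega
      · have := hrest j h; omega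
    -- idx itself is in path
    have hhit : path.contains idx = true := (hiff idx hsi hil).mpr (by simp)
    have hplus : (idx + 1).toNat = idx.toNat + 1 := by omega
    rw [runB, hIH, hdec, keepFrom_append, hAkeep, hlenA]
    have hstep : start + ((idx.toNat : Int) - (start.toNat : Int)) = idx := by omega
    have hlenA' : ((idx.toNat - start.toNat : Nat) : Int) = (idx.toNat : Int) - (start.toNat : Int) := by omega
    rw [hlenA', hstep, keepFrom, hhit, if_pos rfl, hplus]
    congr 1
    rw [PySem.List.slice_toNat image h0 hidx0]

-- properties of B's normalised remove list
theorem remove_mem (image path : List Int) (j : Int) :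
    j ∈ PySem.List.sorted
      (PySem.Set.ofList (path.filter (fun i => decide (0 ≤ i) && decide (i < (image.length : Int)))))
      (fun x => x) false ↔ j ∈ path ∧ 0 ≤ j ∧ j < (image.length : Int) := by
  rw [PySem.List.mem_sorted, PySem.Set.mem_ofList, List.mem_filter]
  simp

-- ===== VERDICT (by name: the statement is the Claim_ definition above) =====
theorem drop_pixels_spec : Claim_equal_drop_pixels := by
  intro image path _
  show drop_pixels image path = drop_pixels_alt image path
  rw [drop_pixels_eq_keepFrom]
  unfold drop_pixels_alt
  rw [dropB_inv image _ 0 [], List.nil_append]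
  rw [runB_eq_keepFrom image path _ 0 (PySem.List.sorted_ofList_pairwise_lt _) le_rfl]
  · simp
  · intro j hj
    have := (remove_mem image path j).mp hj
    exact ⟨this.2.1, this.2.2⟩
  · intro j h1 h2
    rw [remove_mem]
    simp
    omega
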